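-- pv_equiv track=rewrite | github.com/doparko/advent_of_code | aoc2021/day10_code.py | checkcorrupt
-- ===== SOURCE A (Python) =====
-- def checkcorrupt(string):
--     bracket = {')':'(', '}':'{', ']':'[', '>':'<'}
--     string = list(string)
--     # Goal here is to remove the acceptable brackets from the string until we see it
--     # is all okay or finding one corruption
--     i = 0
--     while i < len(string)-1:
--         left = string[i]                  # For comparing 2 characters, this is left/first one
--         right = string[i+1]               # This is right/second character
--         if (right in bracket) and (left not in bracket):    # Checking if right character is close and left is open
--             if bracket[right] == left:                      # If a good open and close remove those two and start over
--                 string.pop(i)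
--                 string.pop(i)
--                 i = -1
--             else:                                           # This is a corruption detected
--                 return True, right
--         i+=1
--     return False, ''.join(string)
-- ===== SOURCE B (Python) =====
-- def checkcorrupt(string):
--     bracket = {')':'(', '}':'{', ']':'[', '>':'<'}
--     stack = []
--     for c in string:
--         if c in bracket:
--             if stack and stack[-1] == bracket[c]:
--                 stack.pop()
--             elif stack and stack[-1] not in bracket:
--                 return True, c
--             else:
--                 stack.append(c)
--         else:
--             stack.append(c)
--     return False, ''.join(stack)
-- ===== Notes on version B (the rewrite author's own statement) =====
-- stated objective: faster
-- what changed: Replaces A's while-loop that deletes each matching adjacent bracket pair and restarts the scan from the beginning of the list with a single left-to-right pass maintaining a stack of the reduced prefix (push non-closers, pop on a matching closer, report the first mismatching closer).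
import Mathlib
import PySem

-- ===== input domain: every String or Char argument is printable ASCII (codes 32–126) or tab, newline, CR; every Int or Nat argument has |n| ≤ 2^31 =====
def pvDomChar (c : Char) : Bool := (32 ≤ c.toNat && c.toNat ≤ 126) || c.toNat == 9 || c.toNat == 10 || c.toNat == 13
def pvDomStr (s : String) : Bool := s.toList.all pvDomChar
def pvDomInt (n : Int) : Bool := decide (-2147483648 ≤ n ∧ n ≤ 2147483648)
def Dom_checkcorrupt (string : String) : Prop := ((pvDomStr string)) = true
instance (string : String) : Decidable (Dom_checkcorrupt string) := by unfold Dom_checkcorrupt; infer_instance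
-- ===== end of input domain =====

-- B replaces A's repeated rescans from the start with a single left-to-right pass over a stack (objective: faster).

-- shared constant: the keys of A's dict `bracket` (the closing brackets)
def pvClosers : List Char := [')', '}', ']', '>']
-- `bracket[c]`; in both ports it is only evaluated under a `c ∈ pvClosers` guard, where it is exact
def pvMate (c : Char) : Char :=
  if c = ')' then '(' else if c = '}' then '{' else if c = ']' then '[' else '<'

-- ===== PORT A =====
-- A's while-loop: index i over the char list; on a matching open/close pair pop twice
-- and restart at i = -1 (then i += 1, i.e. 0); Python's `i < len(string)-1` is `i+1 < length`.
def checkcorruptLoop (s : List Char) (i : Nat) : Bool × String :=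
  if h : i + 1 < s.length then
    let left := s[i]
    let right := s[i+1]
    if right ∈ pvClosers ∧ ¬ left ∈ pvClosers then
      if pvMate right = left then
        checkcorruptLoop ((s.eraseIdx i).eraseIdx i) 0
      else (true, String.ofList [right])
    else checkcorruptLoop s (i+1)
  else (false, String.ofList s)
termination_by (s.length, s.length - i)
decreasing_by
  · have h1 : ((s.eraseIdx i).eraseIdx i).length < s.length := by
      simp only [List.length_eraseIdx]
      split_ifs <;> omega
    exact Prod.Lex.left _ _ h1
  · exact Prod.Lex.right _ (by omega)

def checkcorrupt (string : String) : Bool × String := checkcorruptLoop string.toList 0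

-- ===== PORT B =====
-- B's single pass: `stack` holds the reduced prefix, newest element first.
def checkcorruptAltLoop : List Char → List Char → Bool × String
  | [], stack => (false, String.ofList stack.reverse)
  | c :: rest, stack =>
    if c ∈ pvClosers then
      match stack with
      | t :: stack' =>
        if t = pvMate c then checkcorruptAltLoop rest stack'
        else if ¬ t ∈ pvClosers then (true, String.ofList [c])
        else checkcorruptAltLoop rest (c :: t :: stack')
      | [] => checkcorruptAltLoop rest [c]
    else checkcorruptAltLoop rest (c :: stack)

def checkcorrupt_alt (string : String) : Bool × String := checkcorruptAltLoop string.toList []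

-- ===== PRECONDITION & SPEC =====
def Spec_checkcorrupt (string : String) (out : Bool × String) : Prop := out = checkcorrupt_alt string
instance (string : String) (out : Bool × String) : Decidable (Spec_checkcorrupt string out) := by unfold Spec_checkcorrupt; infer_instance

-- ===== CLAIM (what is proved, stated in full; the proofs are below) =====
def Claim_equal_checkcorrupt : Prop := ∀ (string : String), Dom_checkcorrupt string → Spec_checkcorrupt string (checkcorrupt string)

-- ===== LEMMAS AND PROOFS =====

-- "the pair (left, right) does not trigger A's inner if"
def pvOk (left right : Char) : Prop := ¬ (right ∈ pvClosers ∧ ¬ left ∈ pvClosers)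

lemma loopA_step (s : List Char) (j : Nat) (hj : j + 1 < s.length)
    (hok : pvOk (s[j]'(by omega)) (s[j+1]'hj)) :
    checkcorruptLoop s j = checkcorruptLoop s (j+1) := by
  rw [checkcorruptLoop]
  unfold pvOk at hok
  simp only [hj, dif_pos, hok, if_neg, not_false_iff]

lemma loopA_stop (s : List Char) (j : Nat) (hj : ¬ j + 1 < s.length) :
    checkcorruptLoop s j = (false, String.ofList s) := by
  rw [checkcorruptLoop]
  simp only [hj, dif_neg, not_false_iff]

-- scanning from 0 over non-triggering pairs only increments i
lemma loopA_skip (s : List Char) (m : Nat)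
    (h : ∀ k (hk : k + 1 < s.length), k < m → pvOk (s[k]'(by omega)) (s[k+1]'hk)) :
    checkcorruptLoop s 0 = checkcorruptLoop s m := by
  induction m with
  | zero => rfl
  | succ m ih =>
    rw [ih (fun k hk hkm => h k hk (by omega))]
    by_cases hm : m + 1 < s.length
    · exact loopA_step s m hm (h m hm (by omega))
    · rw [loopA_stop s m hm, loopA_stop s (m+1) (by omega)]

-- the key simulation: B with a reduced stack equals A positioned at the top of the stack
lemma key : ∀ (rest stack : List Char), List.IsChain pvOk stack.reverse →
    checkcorruptAltLoop rest stack
      = checkcorruptLoop (stack.reverse ++ rest) (stack.length - 1) := by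
  intro rest
  induction rest with
  | nil =>
    intro stack _
    rw [checkcorruptAltLoop, loopA_stop _ _ (by simp; omega)]
    simp
  | cons c r ih =>
    intro stack hchain
    match stack with
    | [] =>
      -- both branches of B push c; A's state is literally unchanged
      have hb : checkcorruptAltLoop (c :: r) [] = checkcorruptAltLoop r [c] := by
        rw [checkcorruptAltLoop]; split <;> rfl
      rw [hb, ih [c] (by simp)]
      simp
    | t :: st' =>
      have hshape : (t :: st').reverse ++ c :: r = st'.reverse ++ (t :: c :: r) := by simp
      rw [hshape]
      have hguard : st'.length + 1 < (st'.reverse ++ (t :: c :: r)).length := by simp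
      have hleft : ∀ (h : st'.length < (st'.reverse ++ (t :: c :: r)).length),
          (st'.reverse ++ (t :: c :: r))[st'.length]'h = t := by
        intro h; rw [List.getElem_append_right (by simp)]; simp
      have hright : ∀ (h : st'.length + 1 < (st'.reverse ++ (t :: c :: r)).length),
          (st'.reverse ++ (t :: c :: r))[st'.length + 1]'h = c := by
        intro h; rw [List.getElem_append_right (by simp)]; simp
      have hi : (t :: st').length - 1 = st'.length := by simp
      rw [hi]
      conv_rhs => rw [checkcorruptLoop]
      rw [dif_pos hguard]
      simp only [hleft, hright]
      -- extending the stack with a kept character preserves the invariant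
      have hpush : ∀ (hok : pvOk t c), checkcorruptAltLoop r (c :: t :: st')
          = checkcorruptLoop (st'.reverse ++ (t :: c :: r)) (st'.length + 1) := by
        intro hok
        have hch2 : List.IsChain pvOk (c :: t :: st').reverse := by
          simp only [List.reverse_cons]
          apply List.IsChain.append
          · rw [← List.reverse_cons]; exact hchain
          · simp
          · intro x hx y hy
            simp at hx hy
            subst hx; subst hy
            exact hok
        rw [ih (c :: t :: st') hch2]
        have hsh2 : (c :: t :: st').reverse ++ r = st'.reverse ++ (t :: c :: r) := by simp
        rw [hsh2]
        simp
      by_cases hc : c ∈ pvClosers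
      · have hb : checkcorruptAltLoop (c :: r) (t :: st')
            = (if t = pvMate c then checkcorruptAltLoop r st'
               else if ¬ t ∈ pvClosers then (true, String.ofList [c])
               else checkcorruptAltLoop r (c :: t :: st')) := by
          rw [checkcorruptAltLoop, if_pos hc]
        rw [hb]
        by_cases ht : t ∈ pvClosers
        · -- top of stack is a closer: both sides keep c (B pushes, A steps past)
          have hne : ¬ t = pvMate c := by
            fin_cases hc <;> fin_cases ht <;> simp_all [pvMate]
          rw [if_neg hne, if_neg (by simpa using ht),
            if_neg (show ¬ (c ∈ pvClosers ∧ ¬ t ∈ pvClosers) by tauto)]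
          exact hpush (by unfold pvOk; tauto)
        · by_cases hm : t = pvMate c
          · -- matching pair: A pops twice and restarts at 0; B pops the stack
            rw [if_pos hm, if_pos (show c ∈ pvClosers ∧ ¬ t ∈ pvClosers from ⟨hc, ht⟩),
              if_pos hm.symm]
            have hch' : List.IsChain pvOk st'.reverse := by
              have h2 := hchain
              rw [show (t :: st').reverse = st'.reverse ++ [t] from by simp] at h2
              exact h2.left_of_append
            rw [ih st' hch']
            have he1 : (st'.reverse ++ (t :: c :: r)).eraseIdx st'.length
                = st'.reverse ++ (c :: r) := by
              rw [List.eraseIdx_append_of_length_le (by simp)]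
              simp
            have he2 : (st'.reverse ++ (c :: r)).eraseIdx st'.length = st'.reverse ++ r := by
              rw [List.eraseIdx_append_of_length_le (by simp)]
              simp
            rw [he1, he2]
            symm
            apply loopA_skip
            intro k hk hkm
            have hkl : k + 1 < st'.reverse.length := by simp at hkm ⊢; omega
            have g1 : (st'.reverse ++ r)[k]'(by omega) = st'.reverse[k]'(by omega) :=
              List.getElem_append_left (by omega)
            have g2 : (st'.reverse ++ r)[k+1]'hk = st'.reverse[k+1]'hkl :=
              List.getElem_append_left hkl
            rw [g1, g2]
            exact List.isChain_iff_getElem.mp hch' k hkl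
          · -- mismatch: both report corruption with c
            rw [if_neg hm, if_pos (by simpa using ht),
              if_pos (show c ∈ pvClosers ∧ ¬ t ∈ pvClosers from ⟨hc, ht⟩),
              if_neg (fun h => hm h.symm)]
      · -- c is not a closer: both sides keep c
        have hb : checkcorruptAltLoop (c :: r) (t :: st')
            = checkcorruptAltLoop r (c :: t :: st') := by
          rw [checkcorruptAltLoop, if_neg hc]
        rw [hb, if_neg (show ¬ (c ∈ pvClosers ∧ ¬ t ∈ pvClosers) by tauto)]
        exact hpush (by unfold pvOk; tauto)

-- ===== VERDICT (by name: the statement is the Claim_ definition above) =====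
theorem checkcorrupt_spec : Claim_equal_checkcorrupt := by
  intro string _
  unfold Spec_checkcorrupt checkcorrupt checkcorrupt_alt
  have h := key string.toList []
  simp at h
  rw [h]
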